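-- pv_equiv track=rewrite | github.com/Myute/CS351 | CS351/Python/Homework 1/hwmk1.py | cate_letters
-- ===== SOURCE A (Python) =====
-- def cate_letters(myList):
--     two = []
--     three = []
--     four = []
--
--     for x in myList:
--         if len(x) == 2:
--             two.append(x)
--         elif len(x) == 3:
--             three.append(x)
--         elif len(x) == 4:
--             four.append(x)
--
--     return two, three, four
-- ===== SOURCE B (Python) =====
-- def cate_letters(myList):
--     return ([x for x in myList if len(x) == 2],
--             [x for x in myList if len(x) == 3],
--             [x for x in myList if len(x) == 4])
-- ===== Notes on version B (the rewrite author's own statement) =====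
-- stated objective: idiomatic
-- what changed: Replaces the single pass with three mutable accumulators and an if/elif chain by three independent filter comprehensions, one per bucket.
import Mathlib
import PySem

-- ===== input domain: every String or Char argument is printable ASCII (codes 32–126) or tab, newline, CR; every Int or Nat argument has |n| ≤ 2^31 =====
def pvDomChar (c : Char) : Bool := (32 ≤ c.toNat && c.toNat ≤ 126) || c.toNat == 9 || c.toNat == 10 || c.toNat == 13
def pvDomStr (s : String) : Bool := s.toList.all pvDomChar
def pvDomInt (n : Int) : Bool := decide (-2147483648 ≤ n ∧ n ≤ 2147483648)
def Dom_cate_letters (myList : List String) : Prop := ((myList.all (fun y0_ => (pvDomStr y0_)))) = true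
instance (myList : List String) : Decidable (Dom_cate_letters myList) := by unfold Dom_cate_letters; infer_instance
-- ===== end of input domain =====

-- B replaces A's single pass with three mutable accumulators and an if/elif chain by
-- three independent filter comprehensions, one per bucket (idiomatic; same O(n) cost).

-- ===== PORT A =====
-- one pass over myList, appending to the matching accumulator of the state (two, three, four)
def cate_letters (myList : List String) : List String × List String × List String :=
  myList.foldl
    (fun acc x =>
      if PySem.Str.len x = 2 then (acc.1 ++ [x], acc.2.1, acc.2.2)
      else if PySem.Str.len x = 3 then (acc.1, acc.2.1 ++ [x], acc.2.2)
      else if PySem.Str.len x = 4 then (acc.1, acc.2.1, acc.2.2 ++ [x])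
      else acc)
    ([], [], [])

-- ===== PORT B =====
-- three filter comprehensions
def cate_letters_alt (myList : List String) : List String × List String × List String :=
  (myList.filter (fun x => PySem.Str.len x = 2),
   myList.filter (fun x => PySem.Str.len x = 3),
   myList.filter (fun x => PySem.Str.len x = 4))

-- ===== PRECONDITION & SPEC =====
def Spec_cate_letters (myList : List String) (out : List String × List String × List String) : Prop := out = cate_letters_alt myList
instance (myList : List String) (out : List String × List String × List String) : Decidable (Spec_cate_letters myList out) := by unfold Spec_cate_letters; infer_instance

-- ===== CLAIM (what is proved, stated in full; the proofs are below) =====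
def Claim_equal_cate_letters : Prop := ∀ (myList : List String), Dom_cate_letters myList → Spec_cate_letters myList (cate_letters myList)

-- ===== LEMMAS AND PROOFS =====
-- loop invariant, for any three mutually exclusive decidable predicates: the fold starting
-- from any accumulator appends the three filtered lists
theorem trifold (P Q R : String → Prop) [DecidablePred P] [DecidablePred Q] [DecidablePred R]
    (hpq : ∀ x, P x → ¬ Q x) (hpr : ∀ x, P x → ¬ R x) (hqr : ∀ x, Q x → ¬ R x)
    (myList a b c : List String) :
    myList.foldl
      (fun acc x =>
        if P x then (acc.1 ++ [x], acc.2.1, acc.2.2)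
        else if Q x then (acc.1, acc.2.1 ++ [x], acc.2.2)
        else if R x then (acc.1, acc.2.1, acc.2.2 ++ [x])
        else acc)
      (a, b, c)
    = (a ++ myList.filter (fun x => decide (P x)),
       b ++ myList.filter (fun x => decide (Q x)),
       c ++ myList.filter (fun x => decide (R x))) := by
  induction myList generalizing a b c with
  | nil => simp
  | cons x xs ih =>
    simp only [List.foldl_cons, List.filter_cons]
    by_cases hP : P x
    · simp [hP, hpq x hP, hpr x hP, ih]
    · by_cases hQ : Q x
      · simp [hP, hQ, hqr x hQ, ih]
      · by_cases hR : R x <;> simp [hP, hQ, hR, ih]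

-- ===== VERDICT (by name: the statement is the Claim_ definition above) =====
theorem cate_letters_spec : Claim_equal_cate_letters := by
  intro myList _
  show _ = _
  rw [cate_letters, cate_letters_alt,
    trifold (fun x => PySem.Str.len x = 2) (fun x => PySem.Str.len x = 3)
      (fun x => PySem.Str.len x = 4) (by omega) (by omega) (by omega)]
  simp
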